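/- GENERATED by farm/mkstatement.py from design/units.split.tsv — do not edit.
   THE SPLIT of the proof unit `start_decoder.C6` into `start_decoder.C6a`, `start_decoder.C6b`, `start_decoder.C6c`, `start_decoder.C6d`, `start_decoder.C6e`: the children's statements give the parent's
   UNCHANGED statement (so nothing above the parent — callers, compositions — is touched by the split). -/
import Vorbis.Spec.StartDecoderC6
import Vorbis.Spec.Units.start_decoder_C6
import Vorbis.Spec.Units.start_decoder_C6a
import Vorbis.Spec.Units.start_decoder_C6b
import Vorbis.Spec.Units.start_decoder_C6c
import Vorbis.Spec.Units.start_decoder_C6d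
import Vorbis.Spec.Units.start_decoder_C6e
namespace Vorbis.Spec.Splits
open X86 X86.User Asan

/-- The children of the split unit `start_decoder.C6` prove it, by `Vorbis.Spec.StartDecoder.SegC6.of_parts`. -/
theorem start_decoder_C6
    (h_start_decoder_C6a : Vorbis.Spec.start_decoder_C6a.Statement)
    (h_start_decoder_C6b : Vorbis.Spec.start_decoder_C6b.Statement)
    (h_start_decoder_C6c : Vorbis.Spec.start_decoder_C6c.Statement)
    (h_start_decoder_C6d : Vorbis.Spec.start_decoder_C6d.Statement)
    (h_start_decoder_C6e : Vorbis.Spec.start_decoder_C6e.Statement) :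
    Vorbis.Spec.start_decoder_C6.Statement := by
  intro Lay _hLay μ _hμ u₀ _hcode _h_asan_store4_noabort _h_asan_load4_noabort _h_error _h_setup_malloc _h_asan_store8_noabort _h_setup_temp_malloc
  apply Vorbis.Spec.StartDecoder.SegC6.of_parts
  · exact h_start_decoder_C6a Lay _hLay μ _hμ u₀ _hcode _h_asan_store4_noabort _h_asan_load4_noabort _h_error _h_setup_malloc
  · exact h_start_decoder_C6b Lay _hLay μ _hμ u₀ _hcode _h_error _h_asan_store8_noabort
  · exact h_start_decoder_C6c Lay _hLay μ _hμ u₀ _hcode _h_asan_load4_noabort _h_error _h_asan_store8_noabort _h_setup_temp_malloc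
  · exact h_start_decoder_C6d Lay _hLay μ _hμ u₀ _hcode _h_asan_load4_noabort _h_error _h_asan_store8_noabort _h_setup_temp_malloc
  · exact h_start_decoder_C6e Lay _hLay μ _hμ u₀ _hcode _h_asan_load4_noabort _h_error

end Vorbis.Spec.Splits
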